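-- pv_equiv track=rewrite | github.com/chahat1709/Friday-Omega | python_backend/automation/multi_agent_system.py | _keyword_route
-- ===== SOURCE A (Python) =====
-- def _keyword_route(text: str) -> str:
--     """Deterministic keyword-based routing fallback."""
--     t = text.lower()
--
--     # Priority order matches supervisor.md
--     if any(w in t for w in ["on my phone", "mobile", "android", "whatsapp"]):
--         return "MOBILE_WORKER"
--     if any(w in t for w in ["full audit", "full pentest", "automated audit", "full scan"]):
--         return "WORKFLOW"
--     if any(w in t for w in ["pentest", "nmap", "scan ", "vuln", "metasploit", "sqlmap", "nikto",
--                             "gobuster", "hydra", "enumerate", "wpscan", "exploit", "authorize"]):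
--         return "PENTEST_AGENT"
--     if any(w in t for w in ["shodan", "whois", "dns recon", "virustotal", "exploit search",
--                             "breach check", "osint", "recon"]):
--         return "OSINT_AGENT"
--     if any(w in t for w in ["bug hunt", "hunt ", "find bugs", "test website"]):
--         return "BUG_HUNTER"
--     if any(w in t for w in ["deep audit", "security audit", "check my phone", "wifi security", "smb check"]):
--         return "DEEP_AUDIT"
--     if any(w in t for w in ["scan network", "arp scan", "port scan", "check ports", "discover devices"]):
--         return "IOT_AGENT"
--     if any(w in t for w in ["write code", "create code", "debug", "explain code", "refactor"]):
--         return "CODER"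
--     if any(w in t for w in ["flipper", "rfid", "clone badge", "sub-ghz", "hardware", "physical"]):
--         return "FIELD_OPS"
--     if any(w in t for w in ["open ", "launch ", "minimize", "close "]):
--         return "BLIND_EXECUTOR"
--
--     return "VISION_WORKER"
-- ===== SOURCE B (Python) =====
-- # Single left-to-right position scan with a min-priority accumulator instead of
-- # a priority-ordered chain of substring tests.
-- _GROUPS = [
--     ["on my phone", "mobile", "android", "whatsapp"],
--     ["full audit", "full pentest", "automated audit", "full scan"],
--     ["pentest", "nmap", "scan ", "vuln", "metasploit", "sqlmap", "nikto",
--      "gobuster", "hydra", "enumerate", "wpscan", "exploit", "authorize"],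
--     ["shodan", "whois", "dns recon", "virustotal", "exploit search",
--      "breach check", "osint", "recon"],
--     ["bug hunt", "hunt ", "find bugs", "test website"],
--     ["deep audit", "security audit", "check my phone", "wifi security", "smb check"],
--     ["scan network", "arp scan", "port scan", "check ports", "discover devices"],
--     ["write code", "create code", "debug", "explain code", "refactor"],
--     ["flipper", "rfid", "clone badge", "sub-ghz", "hardware", "physical"],
--     ["open ", "launch ", "minimize", "close "],
-- ]
-- _LABELS = ["MOBILE_WORKER", "WORKFLOW", "PENTEST_AGENT", "OSINT_AGENT",
--            "BUG_HUNTER", "DEEP_AUDIT", "IOT_AGENT", "CODER", "FIELD_OPS",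
--            "BLIND_EXECUTOR", "VISION_WORKER"]
-- _KEYWORDS = [(kw, pri) for pri, kws in enumerate(_GROUPS) for kw in kws]
--
--
-- def _keyword_route(text: str) -> str:
--     """Scan the lowered text once, position by position; at each position try
--     every keyword as a prefix and keep the lowest matching priority.  The
--     label of the best priority wins; with no match the default label wins."""
--     t = text.lower()
--     best = len(_LABELS) - 1
--     for j in range(len(t) + 1):
--         for kw, pri in _KEYWORDS:
--             if pri < best and t.startswith(kw, j):
--                 best = pri
--     return _LABELS[best]
-- ===== Notes on version B (the rewrite author's own statement) =====
-- stated objective: alternative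
-- what changed: Replaces the priority-ordered chain of whole-text substring tests by a single left-to-right scan over text positions that tries every keyword as a prefix at each position and keeps the minimum matching priority, indexing a label table at the end.
import Mathlib
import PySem

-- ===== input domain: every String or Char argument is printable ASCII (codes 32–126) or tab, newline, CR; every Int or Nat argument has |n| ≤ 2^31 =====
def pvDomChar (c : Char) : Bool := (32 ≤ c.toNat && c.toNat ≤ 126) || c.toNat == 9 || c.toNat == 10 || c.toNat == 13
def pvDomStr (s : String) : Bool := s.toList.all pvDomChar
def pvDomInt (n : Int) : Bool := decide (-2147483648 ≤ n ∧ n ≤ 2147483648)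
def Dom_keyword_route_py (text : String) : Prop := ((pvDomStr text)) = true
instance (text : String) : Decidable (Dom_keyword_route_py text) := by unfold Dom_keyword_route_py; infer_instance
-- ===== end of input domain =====

-- B replaces A's priority-ordered chain of substring tests by one position scan
-- with a min-priority accumulator over a flattened keyword table (alternative; same cost).

-- ===== PORT A =====
def keyword_route_py (text : String) : String :=
  let t := PySem.Str.lower text
  if (["on my phone", "mobile", "android", "whatsapp"] : List String).any (fun w => PySem.Str.isIn w t) then "MOBILE_WORKER"
  else if (["full audit", "full pentest", "automated audit", "full scan"] : List String).any (fun w => PySem.Str.isIn w t) then "WORKFLOW"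
  else if (["pentest", "nmap", "scan ", "vuln", "metasploit", "sqlmap", "nikto",
            "gobuster", "hydra", "enumerate", "wpscan", "exploit", "authorize"] : List String).any (fun w => PySem.Str.isIn w t) then "PENTEST_AGENT"
  else if (["shodan", "whois", "dns recon", "virustotal", "exploit search",
            "breach check", "osint", "recon"] : List String).any (fun w => PySem.Str.isIn w t) then "OSINT_AGENT"
  else if (["bug hunt", "hunt ", "find bugs", "test website"] : List String).any (fun w => PySem.Str.isIn w t) then "BUG_HUNTER"
  else if (["deep audit", "security audit", "check my phone", "wifi security", "smb check"] : List String).any (fun w => PySem.Str.isIn w t) then "DEEP_AUDIT"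
  else if (["scan network", "arp scan", "port scan", "check ports", "discover devices"] : List String).any (fun w => PySem.Str.isIn w t) then "IOT_AGENT"
  else if (["write code", "create code", "debug", "explain code", "refactor"] : List String).any (fun w => PySem.Str.isIn w t) then "CODER"
  else if (["flipper", "rfid", "clone badge", "sub-ghz", "hardware", "physical"] : List String).any (fun w => PySem.Str.isIn w t) then "FIELD_OPS"
  else if (["open ", "launch ", "minimize", "close "] : List String).any (fun w => PySem.Str.isIn w t) then "BLIND_EXECUTOR"
  else "VISION_WORKER"

-- ===== PORT B =====
-- Source B's _GROUPS / _LABELS / _KEYWORDS (the comprehension becomes kw_flatten)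
def kw_groups : List (List String) :=
  [ ["on my phone", "mobile", "android", "whatsapp"],
    ["full audit", "full pentest", "automated audit", "full scan"],
    ["pentest", "nmap", "scan ", "vuln", "metasploit", "sqlmap", "nikto",
     "gobuster", "hydra", "enumerate", "wpscan", "exploit", "authorize"],
    ["shodan", "whois", "dns recon", "virustotal", "exploit search",
     "breach check", "osint", "recon"],
    ["bug hunt", "hunt ", "find bugs", "test website"],
    ["deep audit", "security audit", "check my phone", "wifi security", "smb check"],
    ["scan network", "arp scan", "port scan", "check ports", "discover devices"],
    ["write code", "create code", "debug", "explain code", "refactor"],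
    ["flipper", "rfid", "clone badge", "sub-ghz", "hardware", "physical"],
    ["open ", "launch ", "minimize", "close "] ]

def kw_labels : List String :=
  ["MOBILE_WORKER", "WORKFLOW", "PENTEST_AGENT", "OSINT_AGENT",
   "BUG_HUNTER", "DEEP_AUDIT", "IOT_AGENT", "CODER", "FIELD_OPS",
   "BLIND_EXECUTOR", "VISION_WORKER"]

def kw_flatten : Nat → List (List String) → List (List Char × Nat)
  | _, [] => []
  | g, ws :: rest => ws.map (fun w => (w.toList, g)) ++ kw_flatten (g + 1) rest

def kw_kws : List (List Char × Nat) := kw_flatten 0 kw_groups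

-- the double loop of Source B: best = min priority whose keyword is a prefix at some position
def pv_r (t : List Char) : Nat :=
  (List.range (t.length + 1)).foldl
    (fun b j => kw_kws.foldl
      (fun b kp => if kp.2 < b ∧ PySem.Chars.startswith (t.drop j) kp.1 = true then kp.2 else b) b)
    (kw_labels.length - 1)

def keyword_route_py_alt (text : String) : String :=
  kw_labels.getD (pv_r (PySem.Str.lower text).toList) "VISION_WORKER"

-- ===== PRECONDITION & SPEC =====
def Spec_keyword_route_py (text : String) (out : String) : Prop := out = keyword_route_py_alt text
instance (text : String) (out : String) : Decidable (Spec_keyword_route_py text out) := by unfold Spec_keyword_route_py; infer_instance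

-- ===== CLAIM (what is proved, stated in full; the proofs are below) =====
def Claim_equal_keyword_route_py : Prop := ∀ (text : String), Dom_keyword_route_py text → Spec_keyword_route_py text (keyword_route_py text)

-- ===== LEMMAS AND PROOFS =====

-- inner loop = fold of Nat.min over the priorities fired at this position
lemma pv_inner_fold (c : List Char × Nat → Bool) :
    ∀ (L : List (List Char × Nat)) (b : Nat),
      L.foldl (fun b kp => if kp.2 < b ∧ c kp = true then kp.2 else b) b
        = ((L.filter c).map Prod.snd).foldl Nat.min b := by
  intro L
  induction L with
  | nil => intro b; rfl
  | cons x xs ih =>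
    intro b
    by_cases hc : c x = true
    · have hmin : (if x.2 < b ∧ c x = true then x.2 else b) = Nat.min b x.2 := by
        simp only [hc, and_true, Nat.min_def]
        split_ifs <;> omega
      rw [List.foldl_cons, hmin, List.filter_cons_of_pos hc, List.map_cons,
        List.foldl_cons, ih]
    · have hid : (if x.2 < b ∧ c x = true then x.2 else b) = b := by
        split_ifs with h
        · exact absurd h.2 hc
        · rfl
      rw [List.foldl_cons, hid, List.filter_cons_of_neg hc, ih]

-- outer loop over positions = one min-fold over the concatenation
lemma pv_outer_fold (f : Nat → List Nat) :
    ∀ (R : List Nat) (b : Nat),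
      R.foldl (fun b j => (f j).foldl Nat.min b) b = (R.flatMap f).foldl Nat.min b := by
  intro R
  induction R with
  | nil => intro b; rfl
  | cons j js ih => intro b; simp [List.flatMap_cons, List.foldl_append, ih]

lemma pv_minfold_le_init : ∀ (L : List Nat) (b : Nat), L.foldl Nat.min b ≤ b := by
  intro L
  induction L with
  | nil => intro b; simp
  | cons x xs ih => intro b; exact le_trans (ih _) (Nat.min_le_left _ _)

lemma pv_minfold_le_mem : ∀ (L : List Nat) (b x : Nat), x ∈ L → L.foldl Nat.min b ≤ x := by
  intro L
  induction L with
  | nil => intro b x hx; simp at hx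
  | cons y ys ih =>
    intro b x hx
    rcases List.mem_cons.1 hx with h | h
    · subst h
      rw [List.foldl_cons]
      exact le_trans (pv_minfold_le_init _ _) (Nat.min_le_right _ _)
    · exact ih _ _ h

lemma pv_minfold_cases : ∀ (L : List Nat) (b : Nat),
    L.foldl Nat.min b = b ∨ L.foldl Nat.min b ∈ L := by
  intro L
  induction L with
  | nil => intro b; left; rfl
  | cons x xs ih =>
    intro b
    rcases ih (Nat.min b x) with h | h
    · by_cases hbx : b ≤ x
      · left; simpa [Nat.min_def, hbx] using h
      · right
        rw [List.foldl_cons, h]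
        simp [Nat.min_def, hbx]
    · right; right; simpa using h

-- a keyword occurs as a prefix at some position ≤ len iff it is a substring
lemma pv_exists_pos (kw t : List Char) :
    (∃ j, j < t.length + 1 ∧ PySem.Chars.startswith (t.drop j) kw = true)
      ↔ PySem.Chars.isIn kw t = true := by
  rw [← PySem.Chars.exists_prefix_drop_iff_isIn]
  constructor
  · rintro ⟨j, _, h⟩; exact ⟨j, (PySem.Chars.startswith_iff _ _).1 h⟩
  · rintro ⟨j, h⟩
    by_cases hj : j ≤ t.length
    · exact ⟨j, by omega, (PySem.Chars.startswith_iff _ _).2 h⟩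
    · refine ⟨t.length, by omega, (PySem.Chars.startswith_iff _ _).2 ?_⟩
      have hd : t.drop j = [] := List.drop_eq_nil_of_le (by omega)
      rw [hd] at h
      rw [List.drop_length]
      simpa using h

-- membership in the flattened table, both directions
lemma pv_flatten_mem : ∀ (gs : List (List String)) (g0 : Nat) (kw : List Char) (g : Nat),
    (kw, g) ∈ kw_flatten g0 gs →
    ∃ ws w, gs[g - g0]? = some ws ∧ g0 ≤ g ∧ w ∈ ws ∧ w.toList = kw := by
  intro gs
  induction gs with
  | nil => intro g0 kw g h; simp [kw_flatten] at h
  | cons ws rest ih =>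
    intro g0 kw g h
    rw [kw_flatten, List.mem_append] at h
    rcases h with h | h
    · rw [List.mem_map] at h
      obtain ⟨w, hw, heq⟩ := h
      obtain ⟨h1, h2⟩ := Prod.mk.injEq .. ▸ heq
      refine ⟨ws, w, ?_, by omega, hw, h1⟩
      have : g - g0 = 0 := by omega
      simp [this]
    · obtain ⟨ws', w, hget, hle, hmem, hkw⟩ := ih (g0 + 1) kw g h
      refine ⟨ws', w, ?_, by omega, hmem, hkw⟩
      have he : g - g0 = (g - (g0 + 1)) + 1 := by omega
      rw [he]
      simpa using hget

lemma pv_flatten_mem' : ∀ (gs : List (List String)) (g0 i : Nat) (ws : List String) (w : String),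
    gs[i]? = some ws → w ∈ ws → (w.toList, g0 + i) ∈ kw_flatten g0 gs := by
  intro gs
  induction gs with
  | nil => intro g0 i ws w h; simp at h
  | cons ws0 rest ih =>
    intro g0 i ws w hget hw
    cases i with
    | zero =>
      simp at hget
      subst hget
      rw [kw_flatten, List.mem_append]
      left
      exact List.mem_map.2 ⟨w, hw, rfl⟩
    | succ i' =>
      simp at hget
      have := ih (g0 + 1) i' ws w (by simpa using hget) hw
      rw [kw_flatten, List.mem_append]
      right
      have he : g0 + (i' + 1) = (g0 + 1) + i' := by omega
      rw [he]
      exact this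

lemma pv_kws_mem (kw : List Char) (g : Nat) (h : (kw, g) ∈ kw_kws) :
    ∃ ws w, kw_groups[g]? = some ws ∧ w ∈ ws ∧ w.toList = kw := by
  have h' : (kw, g) ∈ kw_flatten 0 kw_groups := by simpa [kw_kws] using h
  obtain ⟨ws, w, hget, _, hw, hwl⟩ := pv_flatten_mem kw_groups 0 kw g h'
  exact ⟨ws, w, by simpa using hget, hw, hwl⟩

-- A's per-group test, moved to the char-list side
lemma pv_cond_bridge (W : List String) (s : String) :
    (W.any fun w => PySem.Str.isIn w s)
      = (W.map String.toList).any (fun kw => PySem.Chars.isIn kw s.toList) := by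
  induction W with
  | nil => rfl
  | cons w ws ih => simp [List.any_cons, Function.comp_def]

-- characterization of pv_r: ≤ 10, below any fired group, and 10 or itself fired
lemma pv_r_eq (t : List Char) :
    pv_r t = ((List.range (t.length + 1)).flatMap
      (fun j => ((kw_kws.filter (fun kp => PySem.Chars.startswith (t.drop j) kp.1)).map Prod.snd))).foldl
        Nat.min 10 := by
  have h1 : (fun (b : Nat) (j : Nat) => kw_kws.foldl
      (fun b kp => if kp.2 < b ∧ PySem.Chars.startswith (t.drop j) kp.1 = true then kp.2 else b) b)
      = fun b j => ((kw_kws.filter (fun kp => PySem.Chars.startswith (t.drop j) kp.1)).map Prod.snd).foldl Nat.min b := by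
    funext b j
    exact pv_inner_fold (fun kp => PySem.Chars.startswith (t.drop j) kp.1) kw_kws b
  have h2 : kw_labels.length - 1 = 10 := rfl
  unfold pv_r
  rw [h2, h1, pv_outer_fold]

lemma pv_mem_Q (t : List Char) (g : Nat) :
    g ∈ (List.range (t.length + 1)).flatMap
        (fun j => ((kw_kws.filter (fun kp => PySem.Chars.startswith (t.drop j) kp.1)).map Prod.snd))
      ↔ ∃ kw, (kw, g) ∈ kw_kws ∧ PySem.Chars.isIn kw t = true := by
  simp only [List.mem_flatMap, List.mem_range, List.mem_map, List.mem_filter]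
  constructor
  · rintro ⟨j, hj, kp, ⟨hmem, hsw⟩, hsnd⟩
    refine ⟨kp.1, ?_, (pv_exists_pos _ _).1 ⟨j, hj, hsw⟩⟩
    rwa [← hsnd, Prod.mk.eta]
  · rintro ⟨kw, hmem, hin⟩
    obtain ⟨j, hj, hsw⟩ := (pv_exists_pos kw t).2 hin
    exact ⟨j, hj, (kw, g), ⟨hmem, hsw⟩, rfl⟩

lemma pv_r_le (t : List Char) (g : Nat) (ws : List String)
    (hg : kw_groups[g]? = some ws)
    (h : (ws.map String.toList).any (fun kw => PySem.Chars.isIn kw t) = true) :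
    pv_r t ≤ g := by
  rw [pv_r_eq]
  apply pv_minfold_le_mem
  rw [pv_mem_Q]
  rw [List.any_eq_true] at h
  obtain ⟨kw, hkw, hin⟩ := h
  rw [List.mem_map] at hkw
  obtain ⟨w, hw, hwl⟩ := hkw
  refine ⟨kw, hwl ▸ ?_, hin⟩
  have := pv_flatten_mem' kw_groups 0 g ws w hg hw
  simpa [kw_kws] using this

lemma pv_r_cases (t : List Char) :
    pv_r t = 10 ∨ (pv_r t < 10 ∧ ∃ ws, kw_groups[pv_r t]? = some ws ∧
      (ws.map String.toList).any (fun kw => PySem.Chars.isIn kw t) = true) := by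
  rw [pv_r_eq]
  rcases pv_minfold_cases ((List.range (t.length + 1)).flatMap
      (fun j => ((kw_kws.filter (fun kp => PySem.Chars.startswith (t.drop j) kp.1)).map Prod.snd))) 10 with h | h
  · left; exact h
  · right
    rw [pv_mem_Q] at h
    obtain ⟨kw, hmem, hin⟩ := h
    obtain ⟨ws, w, hget, hw, hwl⟩ := pv_kws_mem kw _ hmem
    obtain ⟨hlt, -⟩ := List.getElem?_eq_some_iff.1 hget
    have hl : kw_groups.length = 10 := rfl
    rw [hl] at hlt
    refine ⟨hlt, ws, hget, ?_⟩
    rw [List.any_eq_true]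
    exact ⟨kw, List.mem_map.2 ⟨w, hw, hwl⟩, hin⟩


lemma pv_r_le' (t : List Char) (g : Nat)
    (h : ((kw_groups.getD g []).map String.toList).any (fun kw => PySem.Chars.isIn kw t) = true)
    (hg : g < 10) : pv_r t ≤ g := by
  have hget : kw_groups[g]? = some (kw_groups.getD g []) := by
    interval_cases g <;> rfl
  exact pv_r_le t g _ hget h

lemma pv_r_force (t : List Char) (g : Nat) (hg : g < 10) (hr : pv_r t = g) :
    ((kw_groups.getD g []).map String.toList).any (fun kw => PySem.Chars.isIn kw t) = true := by
  rcases pv_r_cases t with h | ⟨hlt, ws, hws, hany⟩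
  · omega
  · rw [hr] at hws
    have hget : kw_groups[g]? = some (kw_groups.getD g []) := by interval_cases g <;> rfl
    rw [hget] at hws
    injection hws with he
    rw [← he] at hany
    exact hany

-- ===== VERDICT (by name: the statement is the Claim_ definition above) =====
theorem keyword_route_py_spec : Claim_equal_keyword_route_py := by
  intro text _
  unfold Spec_keyword_route_py
  have hle10 : pv_r (PySem.Str.lower text).toList ≤ 10 := by
    rw [pv_r_eq]; exact pv_minfold_le_init _ _
  simp only [keyword_route_py, keyword_route_py_alt]
  split
  next h0 =>
    have hle : pv_r (PySem.Str.lower text).toList ≤ 0 :=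
      pv_r_le' _ 0 (by rw [pv_cond_bridge] at h0; exact h0) (by omega)
    have hval : pv_r (PySem.Str.lower text).toList = 0 := by omega
    rw [hval]
    rfl
  next h0 =>
  split
  next h1 =>
    have hne0 : pv_r (PySem.Str.lower text).toList ≠ 0 := fun he =>
      h0 (by rw [pv_cond_bridge]; exact pv_r_force _ 0 (by omega) he)
    have hle : pv_r (PySem.Str.lower text).toList ≤ 1 :=
      pv_r_le' _ 1 (by rw [pv_cond_bridge] at h1; exact h1) (by omega)
    have hval : pv_r (PySem.Str.lower text).toList = 1 := by omega
    rw [hval]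
    rfl
  next h1 =>
  split
  next h2 =>
    have hne0 : pv_r (PySem.Str.lower text).toList ≠ 0 := fun he =>
      h0 (by rw [pv_cond_bridge]; exact pv_r_force _ 0 (by omega) he)
    have hne1 : pv_r (PySem.Str.lower text).toList ≠ 1 := fun he =>
      h1 (by rw [pv_cond_bridge]; exact pv_r_force _ 1 (by omega) he)
    have hle : pv_r (PySem.Str.lower text).toList ≤ 2 :=
      pv_r_le' _ 2 (by rw [pv_cond_bridge] at h2; exact h2) (by omega)
    have hval : pv_r (PySem.Str.lower text).toList = 2 := by omega
    rw [hval]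
    rfl
  next h2 =>
  split
  next h3 =>
    have hne0 : pv_r (PySem.Str.lower text).toList ≠ 0 := fun he =>
      h0 (by rw [pv_cond_bridge]; exact pv_r_force _ 0 (by omega) he)
    have hne1 : pv_r (PySem.Str.lower text).toList ≠ 1 := fun he =>
      h1 (by rw [pv_cond_bridge]; exact pv_r_force _ 1 (by omega) he)
    have hne2 : pv_r (PySem.Str.lower text).toList ≠ 2 := fun he =>
      h2 (by rw [pv_cond_bridge]; exact pv_r_force _ 2 (by omega) he)
    have hle : pv_r (PySem.Str.lower text).toList ≤ 3 :=
      pv_r_le' _ 3 (by rw [pv_cond_bridge] at h3; exact h3) (by omega)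
    have hval : pv_r (PySem.Str.lower text).toList = 3 := by omega
    rw [hval]
    rfl
  next h3 =>
  split
  next h4 =>
    have hne0 : pv_r (PySem.Str.lower text).toList ≠ 0 := fun he =>
      h0 (by rw [pv_cond_bridge]; exact pv_r_force _ 0 (by omega) he)
    have hne1 : pv_r (PySem.Str.lower text).toList ≠ 1 := fun he =>
      h1 (by rw [pv_cond_bridge]; exact pv_r_force _ 1 (by omega) he)
    have hne2 : pv_r (PySem.Str.lower text).toList ≠ 2 := fun he =>
      h2 (by rw [pv_cond_bridge]; exact pv_r_force _ 2 (by omega) he)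
    have hne3 : pv_r (PySem.Str.lower text).toList ≠ 3 := fun he =>
      h3 (by rw [pv_cond_bridge]; exact pv_r_force _ 3 (by omega) he)
    have hle : pv_r (PySem.Str.lower text).toList ≤ 4 :=
      pv_r_le' _ 4 (by rw [pv_cond_bridge] at h4; exact h4) (by omega)
    have hval : pv_r (PySem.Str.lower text).toList = 4 := by omega
    rw [hval]
    rfl
  next h4 =>
  split
  next h5 =>
    have hne0 : pv_r (PySem.Str.lower text).toList ≠ 0 := fun he =>
      h0 (by rw [pv_cond_bridge]; exact pv_r_force _ 0 (by omega) he)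
    have hne1 : pv_r (PySem.Str.lower text).toList ≠ 1 := fun he =>
      h1 (by rw [pv_cond_bridge]; exact pv_r_force _ 1 (by omega) he)
    have hne2 : pv_r (PySem.Str.lower text).toList ≠ 2 := fun he =>
      h2 (by rw [pv_cond_bridge]; exact pv_r_force _ 2 (by omega) he)
    have hne3 : pv_r (PySem.Str.lower text).toList ≠ 3 := fun he =>
      h3 (by rw [pv_cond_bridge]; exact pv_r_force _ 3 (by omega) he)
    have hne4 : pv_r (PySem.Str.lower text).toList ≠ 4 := fun he =>
      h4 (by rw [pv_cond_bridge]; exact pv_r_force _ 4 (by omega) he)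
    have hle : pv_r (PySem.Str.lower text).toList ≤ 5 :=
      pv_r_le' _ 5 (by rw [pv_cond_bridge] at h5; exact h5) (by omega)
    have hval : pv_r (PySem.Str.lower text).toList = 5 := by omega
    rw [hval]
    rfl
  next h5 =>
  split
  next h6 =>
    have hne0 : pv_r (PySem.Str.lower text).toList ≠ 0 := fun he =>
      h0 (by rw [pv_cond_bridge]; exact pv_r_force _ 0 (by omega) he)
    have hne1 : pv_r (PySem.Str.lower text).toList ≠ 1 := fun he =>
      h1 (by rw [pv_cond_bridge]; exact pv_r_force _ 1 (by omega) he)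
    have hne2 : pv_r (PySem.Str.lower text).toList ≠ 2 := fun he =>
      h2 (by rw [pv_cond_bridge]; exact pv_r_force _ 2 (by omega) he)
    have hne3 : pv_r (PySem.Str.lower text).toList ≠ 3 := fun he =>
      h3 (by rw [pv_cond_bridge]; exact pv_r_force _ 3 (by omega) he)
    have hne4 : pv_r (PySem.Str.lower text).toList ≠ 4 := fun he =>
      h4 (by rw [pv_cond_bridge]; exact pv_r_force _ 4 (by omega) he)
    have hne5 : pv_r (PySem.Str.lower text).toList ≠ 5 := fun he =>
      h5 (by rw [pv_cond_bridge]; exact pv_r_force _ 5 (by omega) he)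
    have hle : pv_r (PySem.Str.lower text).toList ≤ 6 :=
      pv_r_le' _ 6 (by rw [pv_cond_bridge] at h6; exact h6) (by omega)
    have hval : pv_r (PySem.Str.lower text).toList = 6 := by omega
    rw [hval]
    rfl
  next h6 =>
  split
  next h7 =>
    have hne0 : pv_r (PySem.Str.lower text).toList ≠ 0 := fun he =>
      h0 (by rw [pv_cond_bridge]; exact pv_r_force _ 0 (by omega) he)
    have hne1 : pv_r (PySem.Str.lower text).toList ≠ 1 := fun he =>
      h1 (by rw [pv_cond_bridge]; exact pv_r_force _ 1 (by omega) he)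
    have hne2 : pv_r (PySem.Str.lower text).toList ≠ 2 := fun he =>
      h2 (by rw [pv_cond_bridge]; exact pv_r_force _ 2 (by omega) he)
    have hne3 : pv_r (PySem.Str.lower text).toList ≠ 3 := fun he =>
      h3 (by rw [pv_cond_bridge]; exact pv_r_force _ 3 (by omega) he)
    have hne4 : pv_r (PySem.Str.lower text).toList ≠ 4 := fun he =>
      h4 (by rw [pv_cond_bridge]; exact pv_r_force _ 4 (by omega) he)
    have hne5 : pv_r (PySem.Str.lower text).toList ≠ 5 := fun he =>
      h5 (by rw [pv_cond_bridge]; exact pv_r_force _ 5 (by omega) he)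
    have hne6 : pv_r (PySem.Str.lower text).toList ≠ 6 := fun he =>
      h6 (by rw [pv_cond_bridge]; exact pv_r_force _ 6 (by omega) he)
    have hle : pv_r (PySem.Str.lower text).toList ≤ 7 :=
      pv_r_le' _ 7 (by rw [pv_cond_bridge] at h7; exact h7) (by omega)
    have hval : pv_r (PySem.Str.lower text).toList = 7 := by omega
    rw [hval]
    rfl
  next h7 =>
  split
  next h8 =>
    have hne0 : pv_r (PySem.Str.lower text).toList ≠ 0 := fun he =>
      h0 (by rw [pv_cond_bridge]; exact pv_r_force _ 0 (by omega) he)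
    have hne1 : pv_r (PySem.Str.lower text).toList ≠ 1 := fun he =>
      h1 (by rw [pv_cond_bridge]; exact pv_r_force _ 1 (by omega) he)
    have hne2 : pv_r (PySem.Str.lower text).toList ≠ 2 := fun he =>
      h2 (by rw [pv_cond_bridge]; exact pv_r_force _ 2 (by omega) he)
    have hne3 : pv_r (PySem.Str.lower text).toList ≠ 3 := fun he =>
      h3 (by rw [pv_cond_bridge]; exact pv_r_force _ 3 (by omega) he)
    have hne4 : pv_r (PySem.Str.lower text).toList ≠ 4 := fun he =>
      h4 (by rw [pv_cond_bridge]; exact pv_r_force _ 4 (by omega) he)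
    have hne5 : pv_r (PySem.Str.lower text).toList ≠ 5 := fun he =>
      h5 (by rw [pv_cond_bridge]; exact pv_r_force _ 5 (by omega) he)
    have hne6 : pv_r (PySem.Str.lower text).toList ≠ 6 := fun he =>
      h6 (by rw [pv_cond_bridge]; exact pv_r_force _ 6 (by omega) he)
    have hne7 : pv_r (PySem.Str.lower text).toList ≠ 7 := fun he =>
      h7 (by rw [pv_cond_bridge]; exact pv_r_force _ 7 (by omega) he)
    have hle : pv_r (PySem.Str.lower text).toList ≤ 8 :=
      pv_r_le' _ 8 (by rw [pv_cond_bridge] at h8; exact h8) (by omega)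
    have hval : pv_r (PySem.Str.lower text).toList = 8 := by omega
    rw [hval]
    rfl
  next h8 =>
  split
  next h9 =>
    have hne0 : pv_r (PySem.Str.lower text).toList ≠ 0 := fun he =>
      h0 (by rw [pv_cond_bridge]; exact pv_r_force _ 0 (by omega) he)
    have hne1 : pv_r (PySem.Str.lower text).toList ≠ 1 := fun he =>
      h1 (by rw [pv_cond_bridge]; exact pv_r_force _ 1 (by omega) he)
    have hne2 : pv_r (PySem.Str.lower text).toList ≠ 2 := fun he =>
      h2 (by rw [pv_cond_bridge]; exact pv_r_force _ 2 (by omega) he)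
    have hne3 : pv_r (PySem.Str.lower text).toList ≠ 3 := fun he =>
      h3 (by rw [pv_cond_bridge]; exact pv_r_force _ 3 (by omega) he)
    have hne4 : pv_r (PySem.Str.lower text).toList ≠ 4 := fun he =>
      h4 (by rw [pv_cond_bridge]; exact pv_r_force _ 4 (by omega) he)
    have hne5 : pv_r (PySem.Str.lower text).toList ≠ 5 := fun he =>
      h5 (by rw [pv_cond_bridge]; exact pv_r_force _ 5 (by omega) he)
    have hne6 : pv_r (PySem.Str.lower text).toList ≠ 6 := fun he =>
      h6 (by rw [pv_cond_bridge]; exact pv_r_force _ 6 (by omega) he)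
    have hne7 : pv_r (PySem.Str.lower text).toList ≠ 7 := fun he =>
      h7 (by rw [pv_cond_bridge]; exact pv_r_force _ 7 (by omega) he)
    have hne8 : pv_r (PySem.Str.lower text).toList ≠ 8 := fun he =>
      h8 (by rw [pv_cond_bridge]; exact pv_r_force _ 8 (by omega) he)
    have hle : pv_r (PySem.Str.lower text).toList ≤ 9 :=
      pv_r_le' _ 9 (by rw [pv_cond_bridge] at h9; exact h9) (by omega)
    have hval : pv_r (PySem.Str.lower text).toList = 9 := by omega
    rw [hval]
    rfl
  next h9 =>
  have hne0 : pv_r (PySem.Str.lower text).toList ≠ 0 := fun he =>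
    h0 (by rw [pv_cond_bridge]; exact pv_r_force _ 0 (by omega) he)
  have hne1 : pv_r (PySem.Str.lower text).toList ≠ 1 := fun he =>
    h1 (by rw [pv_cond_bridge]; exact pv_r_force _ 1 (by omega) he)
  have hne2 : pv_r (PySem.Str.lower text).toList ≠ 2 := fun he =>
    h2 (by rw [pv_cond_bridge]; exact pv_r_force _ 2 (by omega) he)
  have hne3 : pv_r (PySem.Str.lower text).toList ≠ 3 := fun he =>
    h3 (by rw [pv_cond_bridge]; exact pv_r_force _ 3 (by omega) he)
  have hne4 : pv_r (PySem.Str.lower text).toList ≠ 4 := fun he =>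
    h4 (by rw [pv_cond_bridge]; exact pv_r_force _ 4 (by omega) he)
  have hne5 : pv_r (PySem.Str.lower text).toList ≠ 5 := fun he =>
    h5 (by rw [pv_cond_bridge]; exact pv_r_force _ 5 (by omega) he)
  have hne6 : pv_r (PySem.Str.lower text).toList ≠ 6 := fun he =>
    h6 (by rw [pv_cond_bridge]; exact pv_r_force _ 6 (by omega) he)
  have hne7 : pv_r (PySem.Str.lower text).toList ≠ 7 := fun he =>
    h7 (by rw [pv_cond_bridge]; exact pv_r_force _ 7 (by omega) he)
  have hne8 : pv_r (PySem.Str.lower text).toList ≠ 8 := fun he =>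
    h8 (by rw [pv_cond_bridge]; exact pv_r_force _ 8 (by omega) he)
  have hne9 : pv_r (PySem.Str.lower text).toList ≠ 9 := fun he =>
    h9 (by rw [pv_cond_bridge]; exact pv_r_force _ 9 (by omega) he)
  rcases pv_r_cases (PySem.Str.lower text).toList with h10 | ⟨hlt, _, _, _⟩
  · rw [h10]
    rfl
  · omega
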